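-- pv_equiv track=rewrite | github.com/eugen-paul/ProblemsPython | Problems/0_999/600_699/649_Dota2Senate.py | predictPartyVictory_i
-- ===== SOURCE A (Python) =====
-- from collections import defaultdict, deque
--
-- def predictPartyVictory_i(senate: str) -> str:
--     """sample solution"""
--
--     # Eligible Senators of each party
--     r_count = senate.count('R')
--     d_count = len(senate) - r_count
--
--     # Floating Ban Count
--     d_floating_ban = 0
--     r_floating_ban = 0
--
--     # Queue of Senators
--     q = deque(senate)
--
--     # While any party has eligible Senators
--     while r_count and d_count:
--
--         # Pop the senator with turn
--         curr = q.popleft()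
--
--         # If eligible, float the ban on the other party, enqueue again.
--         # If not, decrement the floating ban and count of the party.
--         if curr == 'D':
--             if d_floating_ban:
--                 d_floating_ban -= 1
--                 d_count -= 1
--             else:
--                 r_floating_ban += 1
--                 q.append('D')
--         else:
--             if r_floating_ban:
--                 r_floating_ban -= 1
--                 r_count -= 1
--             else:
--                 d_floating_ban += 1
--                 q.append('R')
--
--     # Return the party with eligible Senators
--     return 'Radiant' if r_count else 'Dire'
-- ===== SOURCE B (Python) =====
-- from collections import deque
--
-- def predictPartyVictory_i(senate: str) -> str:
--     n = len(senate)
--     radiant = deque(i for i, c in enumerate(senate) if c == 'R')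
--     dire = deque(i for i, c in enumerate(senate) if c == 'D')
--     while radiant and dire:
--         r = radiant.popleft()
--         d = dire.popleft()
--         if r < d:
--             radiant.append(r + n)
--         else:
--             dire.append(d + n)
--     return 'Radiant' if radiant else 'Dire'
-- ===== Notes on version B (the rewrite author's own statement) =====
-- stated objective: simpler
-- what changed: Replaces A's single char-queue with floating-ban counters by two deques holding the indices of 'R' and 'D' senators; each round pops both fronts, the smaller index bans the other and re-enqueues itself at index+n.
-- outside the precondition, e.g. on predictPartyVictory_i('XDDR'): A returns 'Dire', B returns 'Dire'
import Mathlib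
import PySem

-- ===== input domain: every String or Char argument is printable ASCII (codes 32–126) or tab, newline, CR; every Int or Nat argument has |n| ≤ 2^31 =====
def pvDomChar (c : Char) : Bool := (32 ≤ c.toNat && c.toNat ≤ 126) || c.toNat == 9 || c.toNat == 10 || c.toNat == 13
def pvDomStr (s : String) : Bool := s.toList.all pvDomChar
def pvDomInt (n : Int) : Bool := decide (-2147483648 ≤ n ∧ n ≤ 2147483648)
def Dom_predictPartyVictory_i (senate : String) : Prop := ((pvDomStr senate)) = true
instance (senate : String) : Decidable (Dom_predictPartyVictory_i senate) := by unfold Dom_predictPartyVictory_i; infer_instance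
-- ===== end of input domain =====

-- B replaces A's single char-queue with floating-ban counters by two index queues (positions of 'R' and 'D')
-- re-enqueued with offset +n; objective: simpler. Equality of RETURN values is proved on Pre_ below.

-- ===== PORT A =====
-- the while loop of A, ported with fuel (`none` = fuel exhausted / popleft on empty queue);
-- 4*(|senate|+2)^2 steps are proved sufficient on every Pre_ input below
def pvLoopA (fuel : Nat) (rc dc dfb rfb : Int) (q : List Char) : Option String :=
  match fuel with
  | 0 => none
  | fuel + 1 =>
    if rc ≠ 0 ∧ dc ≠ 0 then
      match q with
      | [] => none
      | curr :: rest =>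
        if curr = 'D' then
          if dfb ≠ 0 then pvLoopA fuel rc (dc - 1) (dfb - 1) rfb rest
          else pvLoopA fuel rc dc dfb (rfb + 1) (rest ++ ['D'])
        else
          if rfb ≠ 0 then pvLoopA fuel (rc - 1) dc dfb (rfb - 1) rest
          else pvLoopA fuel rc dc (dfb + 1) rfb (rest ++ ['R'])
    else some (if rc ≠ 0 then "Radiant" else "Dire")

def predictPartyVictory_i (senate : String) : String :=
  let rc : Int := (PySem.Str.count senate "R" : Int)
  let dc : Int := PySem.Str.len senate - rc
  let q : List Char := senate.toList
  (pvLoopA (4 * (q.length + 2) * (q.length + 2)) rc dc 0 0 q).getD ""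

-- ===== PORT B =====
def pvLoopB (radiant dire : List Int) (n : Int) : String :=
  match radiant, dire with
  | [], _ => "Dire"
  | _ :: _, [] => "Radiant"
  | r :: rs, d :: ds =>
    if r < d then pvLoopB (rs ++ [r + n]) ds n
    else pvLoopB rs (ds ++ [d + n]) n
termination_by radiant.length + dire.length
decreasing_by all_goals simp

def predictPartyVictory_i_alt (senate : String) : String :=
  let n : Int := PySem.Str.len senate
  let pairs := PySem.List.enumerate senate.toList
  let radiant := (pairs.filter (fun p => p.2 == 'R')).map Prod.fst
  let dire := (pairs.filter (fun p => p.2 == 'D')).map Prod.fst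
  pvLoopB radiant dire n

-- ===== PRECONDITION & SPEC =====
-- Pre_ excludes strings that mix characters other than 'R'/'D' with at least one 'R': A counts such
-- characters as Dire but re-enqueues them as 'R', so it almost always loops forever there, and where it
-- happens to halt its value is an artefact of that mismatch.
def Pre_predictPartyVictory_i (senate : String) : Prop :=
  (senate.toList.all (fun c => c == 'R' || c == 'D') = true) ∨ 'R' ∉ senate.toList
instance (senate : String) : Decidable (Pre_predictPartyVictory_i senate) := by
  unfold Pre_predictPartyVictory_i; infer_instance
def pvWitness_predictPartyVictory_i : String := "RDDR"
def Spec_predictPartyVictory_i (senate : String) (out : String) : Prop := out = predictPartyVictory_i_alt senate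
instance (senate : String) (out : String) : Decidable (Spec_predictPartyVictory_i senate out) := by unfold Spec_predictPartyVictory_i; infer_instance

-- ===== CLAIM (what is proved, stated in full; the proofs are below) =====
def Claim_equal_predictPartyVictory_i : Prop := ∀ (senate : String), Dom_predictPartyVictory_i senate → Pre_predictPartyVictory_i senate → Spec_predictPartyVictory_i senate (predictPartyVictory_i senate)

-- ===== LEMMAS AND PROOFS =====

-- the common abstract game, on the sequence of still-eligible senators in queue order:
-- the front senator bans the first senator of the other party behind it and goes to the back
def pvOpp (c : Char) : Char := if c = 'D' then 'R' else 'D'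

def pvGame : List Char → String
  | [] => "Dire"
  | c :: rest =>
    if h1 : (c :: rest).contains 'R' = false then "Dire"
    else if h2 : (c :: rest).contains 'D' = false then "Radiant"
    else pvGame (rest.erase (pvOpp c) ++ [c])
termination_by s => s.length
decreasing_by
  have hR : ¬'R' = c → 'R' ∈ rest := by simpa using h1
  have hD : ¬'D' = c → 'D' ∈ rest := by simpa using h2
  have ht : pvOpp c ∈ rest := by
    by_cases hc : c = 'D'
    · simpa [pvOpp, hc] using hR (by simp [hc])
    · simpa [pvOpp, hc] using hD (fun h => hc h.symm)
  have hlen := List.length_erase_of_mem ht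
  have hpos := List.length_pos_of_mem ht
  simp only [List.length_append, List.length_cons, List.length_nil, hlen]
  omega

-- the still-eligible senators of A's state: q with its first df 'D's and first rf 'R's dropped
def pvStrip : List Char → Nat → Nat → List Char
  | [], _, _ => []
  | c :: t, df, rf =>
    if c = 'D' then
      if df = 0 then c :: pvStrip t df rf else pvStrip t (df - 1) rf
    else if c = 'R' then
      if rf = 0 then c :: pvStrip t df rf else pvStrip t df (rf - 1)
    else c :: pvStrip t df rf

lemma pvStrip_zero (q : List Char) : pvStrip q 0 0 = q := by
  induction q with
  | nil => rfl
  | cons c t ih => by_cases hc : c = 'D' <;> by_cases hr : c = 'R' <;> simp [pvStrip, hc, hr, ih]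

lemma count_strip_R (q : List Char) : ∀ (df rf : Nat),
    (pvStrip q df rf).count 'R' = q.count 'R' - rf := by
  induction q with
  | nil => intro df rf; simp [pvStrip]
  | cons c t ih =>
    intro df rf
    by_cases hc : c = 'D'
    · subst hc
      cases df with
      | zero => simp [pvStrip, List.count_cons, ih]
      | succ k => simp [pvStrip, List.count_cons, ih]
    · by_cases hr : c = 'R'
      · subst hr
        cases rf with
        | zero => simp [pvStrip, hc, List.count_cons, ih]
        | succ k => simp [pvStrip, hc, List.count_cons, ih] <;> omega
      · simp [pvStrip, hc, hr, List.count_cons, ih]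

lemma count_strip_D (q : List Char) : ∀ (df rf : Nat),
    (pvStrip q df rf).count 'D' = q.count 'D' - df := by
  induction q with
  | nil => intro df rf; simp [pvStrip]
  | cons c t ih =>
    intro df rf
    by_cases hc : c = 'D'
    · subst hc
      cases df with
      | zero => simp [pvStrip, List.count_cons, ih]
      | succ k => simp [pvStrip, List.count_cons, ih] <;> omega
    · by_cases hr : c = 'R'
      · subst hr
        cases rf with
        | zero => simp [pvStrip, hc, List.count_cons, ih]
        | succ k => simp [pvStrip, hc, List.count_cons, ih]
      · simp [pvStrip, hc, hr, List.count_cons, ih]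

lemma pvStrip_append_R (q : List Char) : ∀ (df rf : Nat), rf ≤ q.count 'R' →
    pvStrip (q ++ ['R']) df rf = pvStrip q df rf ++ ['R'] := by
  induction q with
  | nil =>
    intro df rf h
    simp at h
    simp [h, pvStrip]
  | cons c t ih =>
    intro df rf h
    by_cases hc : c = 'D'
    · subst hc
      cases df with
      | zero => simp [pvStrip, ih _ _ (by simpa [List.count_cons] using h)]
      | succ k => simp [pvStrip, ih _ _ (by simpa [List.count_cons] using h)]
    · by_cases hr : c = 'R'
      · subst hr
        cases rf with
        | zero => simp [pvStrip, hc, ih df 0 (Nat.zero_le _)]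
        | succ k =>
          have h' : k ≤ t.count 'R' := by simp [List.count_cons] at h; omega
          simp [pvStrip, hc, ih _ _ h']
      · simp [pvStrip, hc, hr, ih _ _ (by simpa [List.count_cons, hr] using h)]

lemma pvStrip_append_D (q : List Char) : ∀ (df rf : Nat), df ≤ q.count 'D' →
    pvStrip (q ++ ['D']) df rf = pvStrip q df rf ++ ['D'] := by
  induction q with
  | nil =>
    intro df rf h
    simp at h
    simp [h, pvStrip]
  | cons c t ih =>
    intro df rf h
    by_cases hc : c = 'D'
    · subst hc
      cases df with
      | zero => simp [pvStrip, ih 0 rf (Nat.zero_le _)]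
      | succ k =>
        have h' : k ≤ t.count 'D' := by simp [List.count_cons] at h; omega
        simp [pvStrip, ih _ _ h']
    · by_cases hr : c = 'R'
      · subst hr
        cases rf with
        | zero => simp [pvStrip, hc, ih _ _ (by simpa [List.count_cons, hc] using h)]
        | succ k => simp [pvStrip, hc, ih _ _ (by simpa [List.count_cons, hc] using h)]
      · simp [pvStrip, hc, hr, ih _ _ (by simpa [List.count_cons, hc] using h)]

lemma pvStrip_succ_R (q : List Char) : ∀ (df rf : Nat), rf < q.count 'R' →
    pvStrip q df (rf + 1) = (pvStrip q df rf).erase 'R' := by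
  induction q with
  | nil => intro df rf h; simp at h
  | cons c t ih =>
    intro df rf h
    by_cases hc : c = 'D'
    · subst hc
      have h' : rf < t.count 'R' := by simpa [List.count_cons] using h
      cases df with
      | zero => simp [pvStrip, ih _ _ h', List.erase_cons]
      | succ k => simp [pvStrip, ih _ _ h']
    · by_cases hr : c = 'R'
      · subst hr
        cases rf with
        | zero => simp [pvStrip, hc, List.erase_cons]
        | succ k =>
          have h' : k < t.count 'R' := by simp [List.count_cons] at h; omega
          simp [pvStrip, hc, ih _ _ h']
      · have h' : rf < t.count 'R' := by simpa [List.count_cons, hr] using h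
        simp [pvStrip, hc, hr, ih _ _ h', List.erase_cons, hr]

lemma pvStrip_succ_D (q : List Char) : ∀ (df rf : Nat), df < q.count 'D' →
    pvStrip q (df + 1) rf = (pvStrip q df rf).erase 'D' := by
  induction q with
  | nil => intro df rf h; simp at h
  | cons c t ih =>
    intro df rf h
    by_cases hc : c = 'D'
    · subst hc
      cases df with
      | zero => simp [pvStrip, List.erase_cons]
      | succ k =>
        have h' : k < t.count 'D' := by simp [List.count_cons] at h; omega
        simp [pvStrip, ih _ _ h']
    · by_cases hr : c = 'R'
      · subst hr
        have h' : df < t.count 'D' := by simpa [List.count_cons, hc] using h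
        cases rf with
        | zero => simp [pvStrip, hc, ih _ _ h', List.erase_cons]
        | succ k => simp [pvStrip, hc, ih _ _ h']
      · have h' : df < t.count 'D' := by simpa [List.count_cons, hc] using h
        simp [pvStrip, hc, hr, ih _ _ h', List.erase_cons, hc]

-- unfoldings of pvGame
lemma pvGame_dire (s : List Char) (h : 'R' ∉ s) : pvGame s = "Dire" := by
  cases s with
  | nil => rw [pvGame]
  | cons c rest => rw [pvGame, dif_pos (by simpa using h)]

lemma pvGame_radiant (s : List Char) (h1 : 'R' ∈ s) (h2 : 'D' ∉ s) : pvGame s = "Radiant" := by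
  cases s with
  | nil => simp at h1
  | cons c rest =>
    have hx : ¬'R' = c → 'R' ∈ rest := by
      intro hx
      rcases List.mem_cons.mp h1 with h | h
      · exact absurd h.symm fun hh => hx hh.symm
      · exact h
    rw [pvGame, dif_neg (by simpa using hx), dif_pos (by simpa using h2)]

lemma pvGame_step (c : Char) (rest : List Char) (h1 : 'R' ∈ c :: rest)
    (h2 : 'D' ∈ c :: rest) :
    pvGame (c :: rest) = pvGame (rest.erase (pvOpp c) ++ [c]) := by
  have hx1 : ¬'R' = c → 'R' ∈ rest := by
    intro hx
    rcases List.mem_cons.mp h1 with h | h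
    · exact absurd h.symm fun hh => hx hh.symm
    · exact h
  have hx2 : ¬'D' = c → 'D' ∈ rest := by
    intro hx
    rcases List.mem_cons.mp h2 with h | h
    · exact absurd h.symm fun hh => hx hh.symm
    · exact h
  rw [pvGame, dif_neg (by simpa using hx1), dif_neg (by simpa using hx2)]

-- A's loop, in the phase where every remaining 'R' is already banned: ends in "Dire"
lemma pvLoopA_dire : ∀ (fuel : Nat) (q : List Char) (df rf : Nat),
    (∀ c ∈ q, c = 'R' ∨ c = 'D') →
    q.count 'R' ≤ rf →
    df < q.count 'D' →
    q.count 'R' * (q.length + 1) + q.idxOf 'R' < fuel →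
    pvLoopA fuel (q.count 'R') (q.count 'D') df rf q = some "Dire" := by
  intro fuel
  induction fuel with
  | zero => intro q df rf _ _ _ hμ; exact absurd hμ (Nat.not_lt_zero _)
  | succ fuel ih =>
    intro q df rf hq hR hD hμ
    by_cases hR0 : q.count 'R' = 0
    · simp [pvLoopA, hR0]
    · have hq_ne : q ≠ [] := by intro h; subst h; simp at hR0
      obtain ⟨c, rest, rfl⟩ := List.exists_cons_of_ne_nil hq_ne
      have hDpos : (0:Int) ≠ ((c :: rest).count 'D' : Int) := by
        have : 0 < (c :: rest).count 'D' := by omega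
        exact_mod_cast this.ne
      rcases hq c List.mem_cons_self with hc | hc
      · -- dead 'R' at the front
        subst hc
        have hcnt : ('R' :: rest).count 'R' = rest.count 'R' + 1 := by simp
        have hcntD : ('R' :: rest).count 'D' = rest.count 'D' := by simp
        have hrf : 1 ≤ rf := by omega
        rw [pvLoopA]
        rw [if_pos ⟨by exact_mod_cast hR0, fun h => hDpos h.symm⟩]
        rw [if_neg (by decide), if_pos (by exact_mod_cast (show rf ≠ 0 by omega))]
        have e1 : ((('R' :: rest).count 'R' : Int) - 1) = ((rest.count 'R' : Nat) : Int) := by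
          rw [hcnt]; push_cast; ring
        have e2 : ((rf : Int) - 1) = ((rf - 1 : Nat) : Int) := by omega
        rw [e1, e2, hcntD]
        apply ih rest df (rf - 1) (fun x hx => hq x (List.mem_cons_of_mem _ hx)) (by omega) (by omega)
        -- measure
        have hidxq : ('R' :: rest).idxOf 'R' = 0 := by simp
        have hidx : rest.idxOf 'R' ≤ rest.length := List.idxOf_le_length
        have hmul : rest.count 'R' * (rest.length + 1) ≤ rest.count 'R' * (rest.length + 2) :=
          Nat.mul_le_mul_left _ (by omega)
        have hexp : (rest.count 'R' + 1) * (rest.length + 2)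
            = rest.count 'R' * (rest.length + 2) + (rest.length + 2) := by ring
        rw [hcnt, hidxq] at hμ
        simp only [List.length_cons] at hμ
        rw [hexp] at hμ
        linarith
      · -- 'D' at the front
        subst hc
        have hcnt : ('D' :: rest).count 'R' = rest.count 'R' := by simp
        have hcntD : ('D' :: rest).count 'D' = rest.count 'D' + 1 := by simp
        have hmemR : 'R' ∈ rest := by
          have : 0 < rest.count 'R' := by omega
          exact List.count_pos_iff.mp this
        have hidxq : ('D' :: rest).idxOf 'R' = rest.idxOf 'R' + 1 := by
          rw [List.idxOf_cons_ne _ (by decide)]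
        rw [pvLoopA]
        rw [if_pos ⟨by exact_mod_cast hR0, fun h => hDpos h.symm⟩]
        rw [if_pos rfl]
        by_cases hdf : df = 0
        · -- eligible 'D': floats a ban, re-enqueued
          subst hdf
          rw [if_neg (by simp)]
          have e2 : ((rf : Int) + 1) = ((rf + 1 : Nat) : Int) := by push_cast; ring
          have ecR : ('D' :: rest).count 'R' = (rest ++ ['D']).count 'R' := by simp
          have ecD : ('D' :: rest).count 'D' = (rest ++ ['D']).count 'D' := by simp
          rw [e2, ecR, ecD]
          apply ih (rest ++ ['D']) 0 (rf + 1)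
          · intro x hx
            rcases List.mem_append.mp hx with h | h
            · exact hq x (List.mem_cons_of_mem _ h)
            · simp at h; subst h; right; rfl
          · simp; omega
          · simp
          · have hidx' : (rest ++ ['D']).idxOf 'R' = rest.idxOf 'R' :=
              List.idxOf_append_of_mem hmemR
            have hlen' : (rest ++ ['D']).length = rest.length + 1 := by simp
            have hc' : (rest ++ ['D']).count 'R' = rest.count 'R' := by simp
            rw [hidx', hlen', hc']
            rw [hcnt, hidxq] at hμ
            simp only [List.length_cons] at hμ
            linarith
        · -- banned 'D': removed
          rw [if_pos (by exact_mod_cast (show df ≠ 0 by omega))]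
          have e1 : ((('D' :: rest).count 'D' : Int) - 1) = ((rest.count 'D' : Nat) : Int) := by
            rw [hcntD]; push_cast; ring
          have e2 : ((df : Int) - 1) = ((df - 1 : Nat) : Int) := by omega
          rw [e1, e2, hcnt]
          apply ih rest (df - 1) rf (fun x hx => hq x (List.mem_cons_of_mem _ hx)) (by omega) (by omega)
          have hmul : rest.count 'R' * (rest.length + 1) ≤ rest.count 'R' * (rest.length + 2) :=
            Nat.mul_le_mul_left _ (by omega)
          rw [hcnt, hidxq] at hμ
          simp only [List.length_cons] at hμ
          linarith

-- mirror phase: every remaining 'D' already banned: ends in "Radiant"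
lemma pvLoopA_radiant : ∀ (fuel : Nat) (q : List Char) (df rf : Nat),
    (∀ c ∈ q, c = 'R' ∨ c = 'D') →
    q.count 'D' ≤ df →
    rf < q.count 'R' →
    q.count 'D' * (q.length + 1) + q.idxOf 'D' < fuel →
    pvLoopA fuel (q.count 'R') (q.count 'D') df rf q = some "Radiant" := by
  intro fuel
  induction fuel with
  | zero => intro q df rf _ _ _ hμ; exact absurd hμ (Nat.not_lt_zero _)
  | succ fuel ih =>
    intro q df rf hq hD hR hμ
    by_cases hD0 : q.count 'D' = 0
    · have hrc : ((q.count 'R' : Int)) ≠ 0 := by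
        have : 0 < q.count 'R' := by omega
        exact_mod_cast this.ne'
      simp [pvLoopA, hD0, hrc]
      omega
    · have hq_ne : q ≠ [] := by intro h; subst h; simp at hD0
      obtain ⟨c, rest, rfl⟩ := List.exists_cons_of_ne_nil hq_ne
      have hRpos : ((c :: rest).count 'R' : Int) ≠ 0 := by
        have : 0 < (c :: rest).count 'R' := by omega
        exact_mod_cast this.ne'
      have hDne : ((c :: rest).count 'D' : Int) ≠ 0 := by
        exact_mod_cast hD0
      rcases hq c List.mem_cons_self with hc | hc
      · -- 'R' at the front
        subst hc
        have hcnt : ('R' :: rest).count 'R' = rest.count 'R' + 1 := by simp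
        have hcntD : ('R' :: rest).count 'D' = rest.count 'D' := by simp
        have hmemD : 'D' ∈ rest := by
          have : 0 < rest.count 'D' := by omega
          exact List.count_pos_iff.mp this
        have hidxq : ('R' :: rest).idxOf 'D' = rest.idxOf 'D' + 1 := by
          rw [List.idxOf_cons_ne _ (by decide)]
        rw [pvLoopA]
        rw [if_pos ⟨hRpos, hDne⟩]
        rw [if_neg (by decide)]
        by_cases hrf : rf = 0
        · -- eligible 'R': floats a ban, re-enqueued
          subst hrf
          rw [if_neg (by simp)]
          have e2 : ((df : Int) + 1) = ((df + 1 : Nat) : Int) := by push_cast; ring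
          have ecR : ('R' :: rest).count 'R' = (rest ++ ['R']).count 'R' := by simp
          have ecD : ('R' :: rest).count 'D' = (rest ++ ['R']).count 'D' := by simp
          rw [e2, ecR, ecD]
          apply ih (rest ++ ['R']) (df + 1) 0
          · intro x hx
            rcases List.mem_append.mp hx with h | h
            · exact hq x (List.mem_cons_of_mem _ h)
            · simp at h; subst h; left; rfl
          · simp <;> omega
          · simp <;> omega
          · have hidx' : (rest ++ ['R']).idxOf 'D' = rest.idxOf 'D' :=
              List.idxOf_append_of_mem hmemD
            have hlen' : (rest ++ ['R']).length = rest.length + 1 := by simp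
            have hc' : (rest ++ ['R']).count 'D' = rest.count 'D' := by simp
            rw [hidx', hlen', hc']
            rw [hcntD, hidxq] at hμ
            simp only [List.length_cons] at hμ
            linarith
        · -- banned 'R': removed
          rw [if_pos (by exact_mod_cast (show rf ≠ 0 by omega))]
          have e1 : ((('R' :: rest).count 'R' : Int) - 1) = ((rest.count 'R' : Nat) : Int) := by
            rw [hcnt]; push_cast; ring
          have e2 : ((rf : Int) - 1) = ((rf - 1 : Nat) : Int) := by omega
          rw [e1, e2, hcntD]
          apply ih rest (df) (rf - 1) (fun x hx => hq x (List.mem_cons_of_mem _ hx)) (by omega) (by omega)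
          have hmul : rest.count 'D' * (rest.length + 1) ≤ rest.count 'D' * (rest.length + 2) :=
            Nat.mul_le_mul_left _ (by omega)
          rw [hcntD, hidxq] at hμ
          simp only [List.length_cons] at hμ
          linarith
      · -- banned 'D' at the front: removed
        subst hc
        have hcnt : ('D' :: rest).count 'R' = rest.count 'R' := by simp
        have hcntD : ('D' :: rest).count 'D' = rest.count 'D' + 1 := by simp
        have hdf : 1 ≤ df := by omega
        rw [pvLoopA]
        rw [if_pos ⟨hRpos, hDne⟩]
        rw [if_pos rfl, if_pos (by exact_mod_cast (show df ≠ 0 by omega))]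
        have e1 : ((('D' :: rest).count 'D' : Int) - 1) = ((rest.count 'D' : Nat) : Int) := by
          rw [hcntD]; push_cast; ring
        have e2 : ((df : Int) - 1) = ((df - 1 : Nat) : Int) := by omega
        rw [e1, e2, hcnt]
        apply ih rest (df - 1) rf (fun x hx => hq x (List.mem_cons_of_mem _ hx)) (by omega) (by omega)
        have hidxq : ('D' :: rest).idxOf 'D' = 0 := by simp
        have hidx : rest.idxOf 'D' ≤ rest.length := List.idxOf_le_length
        have hmul : rest.count 'D' * (rest.length + 1) ≤ rest.count 'D' * (rest.length + 2) :=
          Nat.mul_le_mul_left _ (by omega)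
        have hexp : (rest.count 'D' + 1) * (rest.length + 2)
            = rest.count 'D' * (rest.length + 2) + (rest.length + 2) := by ring
        rw [hcntD, hidxq] at hμ
        simp only [List.length_cons] at hμ
        rw [hexp] at hμ
        linarith

lemma length_strip_min (q : List Char) : ∀ (df rf : Nat),
    (pvStrip q df rf).length + min df (q.count 'D') + min rf (q.count 'R') = q.length := by
  induction q with
  | nil => intro df rf; simp [pvStrip]
  | cons c t ih =>
    intro df rf
    by_cases hc : c = 'D'
    · subst hc
      cases df with
      | zero => have := ih 0 rf; simp [pvStrip, List.count_cons] at this ⊢; omega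
      | succ k => have := ih k rf; simp [pvStrip, List.count_cons] at this ⊢; omega
    · by_cases hr : c = 'R'
      · subst hr
        cases rf with
        | zero => have := ih df 0; simp [pvStrip, hc, List.count_cons] at this ⊢; omega
        | succ k => have := ih df k; simp [pvStrip, hc, List.count_cons] at this ⊢; omega
      · have := ih df rf
        simp [pvStrip, hc, hr, List.count_cons] at this ⊢
        omega

-- main lemma for A: the loop computes pvGame of the eligible-senator sequence
lemma pvLoopA_eq_game : ∀ (fuel : Nat) (q : List Char) (df rf : Nat),
    (∀ c ∈ q, c = 'R' ∨ c = 'D') →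
    (q ≠ [] → 0 < (q.count 'R' - rf) + (q.count 'D' - df)) →
    ((pvStrip q df rf).length + q.length) * (q.length + 2) + q.length < fuel →
    pvLoopA fuel (q.count 'R') (q.count 'D') (df : Int) (rf : Int) q
      = some (pvGame (pvStrip q df rf)) := by
  intro fuel
  induction fuel with
  | zero => intro q df rf _ _ hμ; exact absurd hμ (Nat.not_lt_zero _)
  | succ fuel ih =>
    intro q df rf hq hinv hμ
    by_cases hR0 : q.count 'R' = 0
    · -- no 'R' at all: A answers Dire at once, and the eligible sequence has no 'R'
      have hsR : 'R' ∉ pvStrip q df rf := by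
        have := count_strip_R q df rf
        have hz : (pvStrip q df rf).count 'R' = 0 := by omega
        exact List.count_eq_zero.mp hz
      rw [pvGame_dire _ hsR]
      simp [pvLoopA, hR0]
    · by_cases hD0 : q.count 'D' = 0
      · -- no 'D' at all: A answers Radiant at once
        have hq_ne : q ≠ [] := by intro h; subst h; simp at hR0
        have hsD : 'D' ∉ pvStrip q df rf := by
          have := count_strip_D q df rf
          have hz : (pvStrip q df rf).count 'D' = 0 := by omega
          exact List.count_eq_zero.mp hz
        have hsR : 'R' ∈ pvStrip q df rf := by
          have hcnt := count_strip_R q df rf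
          have := hinv hq_ne
          have : 0 < (pvStrip q df rf).count 'R' := by omega
          exact List.count_pos_iff.mp this
        rw [pvGame_radiant _ hsR hsD]
        have hrc : ((q.count 'R' : Int)) ≠ 0 := by exact_mod_cast hR0
        simp [pvLoopA, hD0, hrc]
        omega
      · -- both parties still counted: one loop step
        have hq_ne : q ≠ [] := by intro h; subst h; simp at hR0
        obtain ⟨c, rest, rfl⟩ := List.exists_cons_of_ne_nil hq_ne
        have hguard : ((c :: rest).count 'R' : Int) ≠ 0 ∧ ((c :: rest).count 'D' : Int) ≠ 0 :=
          ⟨by exact_mod_cast hR0, by exact_mod_cast hD0⟩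
        rcases hq c List.mem_cons_self with hc | hc
        · -- 'R' in front
          subst hc
          have hcntR : ('R' :: rest).count 'R' = rest.count 'R' + 1 := by simp
          have hcntD : ('R' :: rest).count 'D' = rest.count 'D' := by simp
          rw [pvLoopA, if_pos hguard, if_neg (by decide)]
          by_cases hrf : rf = 0
          · -- eligible 'R' acts
            subst hrf
            have hs : pvStrip ('R' :: rest) df 0 = 'R' :: pvStrip rest df 0 := by
              simp [pvStrip]
            rw [if_neg (by simp)]
            have e2 : ((df : Int) + 1) = ((df + 1 : Nat) : Int) := by push_cast; ring
            have ecR : ('R' :: rest).count 'R' = (rest ++ ['R']).count 'R' := by simp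
            have ecD : ('R' :: rest).count 'D' = (rest ++ ['R']).count 'D' := by simp
            have hlen' : (rest ++ ['R']).length = rest.length + 1 := by simp
            by_cases halive : df < rest.count 'D'
            · -- some eligible 'D' remains: one pvGame step
              have hstep : pvStrip (rest ++ ['R']) (df + 1) 0
                  = (pvStrip rest df 0).erase 'D' ++ ['R'] := by
                rw [pvStrip_append_R rest (df+1) 0 (by omega), pvStrip_succ_D rest df 0 halive]
              have hmemD : 'D' ∈ pvStrip rest df 0 := by
                have := count_strip_D rest df 0
                have : 0 < (pvStrip rest df 0).count 'D' := by omega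
                exact List.count_pos_iff.mp this
              have hb : 1 ≤ (pvStrip rest df 0).length := List.length_pos_of_mem hmemD
              have herase : ((pvStrip rest df 0).erase 'D').length
                  = (pvStrip rest df 0).length - 1 := List.length_erase_of_mem hmemD
              rw [e2, ecR, ecD]
              rw [hs, pvGame_step 'R' (pvStrip rest df 0)
                    (List.mem_cons_self) (List.mem_cons_of_mem _ hmemD)]
              have hopp : pvOpp 'R' = 'D' := by decide
              rw [hopp, ← hstep]
              apply ih (rest ++ ['R']) (df + 1) 0
              · intro x hx
                rcases List.mem_append.mp hx with h | h
                · exact hq x (List.mem_cons_of_mem _ h)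
                · simp at h; subst h; left; rfl
              · intro _
                have : 0 < (rest ++ ['R']).count 'R' := by simp
                omega
              · -- measure decreases
                rw [hstep, hlen']
                set b := (pvStrip rest df 0).length with hbdef
                have hsa : (pvStrip ('R' :: rest) df 0).length = b + 1 := by rw [hs, List.length_cons, ← hbdef]
                have hlen2 : ((pvStrip rest df 0).erase 'D' ++ ['R']).length = b := by
                  simp only [List.length_append, List.length_cons, List.length_nil, herase]
                  omega
                rw [hlen2]
                rw [hsa] at hμ
                simp only [List.length_cons] at hμ
                have hexp : (b + 1 + (rest.length + 1)) * (rest.length + 1 + 2)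
                    = (b + (rest.length + 1)) * (rest.length + 1 + 2) + (rest.length + 3) := by
                  ring
                rw [hexp] at hμ
                linarith
            · -- no eligible 'D' remains: Radiant phase
              rw [Nat.not_lt] at halive
              have hsD : 'D' ∉ pvStrip ('R' :: rest) df 0 := by
                have := count_strip_D ('R' :: rest) df 0
                have hz : (pvStrip ('R' :: rest) df 0).count 'D' = 0 := by
                  rw [this, hcntD]; omega
                exact List.count_eq_zero.mp hz
              have hsR : 'R' ∈ pvStrip ('R' :: rest) df 0 := by
                rw [hs]; exact List.mem_cons_self
              rw [pvGame_radiant _ hsR hsD]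
              rw [e2, ecR, ecD]
              apply pvLoopA_radiant
              · intro x hx
                rcases List.mem_append.mp hx with h | h
                · exact hq x (List.mem_cons_of_mem _ h)
                · simp at h; subst h; left; rfl
              · simp <;> omega
              · simp <;> omega
              · -- fuel bound for the phase
                have hmin := length_strip_min ('R' :: rest) df 0
                rw [hcntD, hcntR] at hmin
                set a := (pvStrip ('R' :: rest) df 0).length with hadef
                have ha1 : 1 ≤ a := by rw [hadef, hs]; simp
                have hminD : min df (rest.count 'D') = rest.count 'D' := by omega
                rw [hminD] at hmin
                simp only [List.length_cons] at hmin hμ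
                have hcD' : (rest ++ ['R']).count 'D' = rest.count 'D' := by simp
                have hidx : (rest ++ ['R']).idxOf 'D' ≤ (rest ++ ['R']).length :=
                  List.idxOf_le_length
                rw [hcD', hlen']
                set cD := rest.count 'D' with hcDdef
                set L := rest.length + 1 with hLdef
                have hle : cD + 2 ≤ a + L := by omega
                have hmul : (cD + 2) * (L + 2) ≤ (a + L) * (L + 2) :=
                  Nat.mul_le_mul_right _ hle
                have hexp : (cD + 2) * (L + 2) = cD * (L + 1) + cD + 2 * L + 4 := by ring
                rw [hlen'] at hidx
                linarith
          · -- banned 'R' in front: removed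
            have hrf1 : 1 ≤ rf := by omega
            have hs : pvStrip ('R' :: rest) df rf = pvStrip rest df (rf - 1) := by
              cases rf with
              | zero => omega
              | succ k => simp [pvStrip]
            rw [if_pos (by exact_mod_cast (show rf ≠ 0 by omega))]
            have e1 : ((('R' :: rest).count 'R' : Int) - 1) = ((rest.count 'R' : Nat) : Int) := by
              rw [hcntR]; push_cast; ring
            have e2 : ((rf : Int) - 1) = ((rf - 1 : Nat) : Int) := by omega
            rw [e1, e2, hcntD, hs]
            apply ih rest df (rf - 1) (fun x hx => hq x (List.mem_cons_of_mem _ hx))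
            · intro hne
              have := hinv (by simp)
              rw [hcntR, hcntD] at this
              omega
            · rw [← hs]
              set a := (pvStrip ('R' :: rest) df rf).length with hadef
              simp only [List.length_cons] at hμ
              have hmul : (a + rest.length) * (rest.length + 2)
                  ≤ (a + rest.length + 1) * (rest.length + 3) :=
                Nat.mul_le_mul (by omega) (by omega)
              linarith
        · -- 'D' in front
          subst hc
          have hcntR : ('D' :: rest).count 'R' = rest.count 'R' := by simp
          have hcntD : ('D' :: rest).count 'D' = rest.count 'D' + 1 := by simp
          rw [pvLoopA, if_pos hguard, if_pos rfl]
          by_cases hdf : df = 0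
          · -- eligible 'D' acts
            subst hdf
            have hs : pvStrip ('D' :: rest) 0 rf = 'D' :: pvStrip rest 0 rf := by
              simp [pvStrip]
            rw [if_neg (by simp)]
            have e2 : ((rf : Int) + 1) = ((rf + 1 : Nat) : Int) := by push_cast; ring
            have ecR : ('D' :: rest).count 'R' = (rest ++ ['D']).count 'R' := by simp
            have ecD : ('D' :: rest).count 'D' = (rest ++ ['D']).count 'D' := by simp
            have hlen' : (rest ++ ['D']).length = rest.length + 1 := by simp
            by_cases halive : rf < rest.count 'R'
            · -- some eligible 'R' remains: one pvGame step
              have hstep : pvStrip (rest ++ ['D']) 0 (rf + 1)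
                  = (pvStrip rest 0 rf).erase 'R' ++ ['D'] := by
                rw [pvStrip_append_D rest 0 (rf+1) (by omega), pvStrip_succ_R rest 0 rf halive]
              have hmemR : 'R' ∈ pvStrip rest 0 rf := by
                have := count_strip_R rest 0 rf
                have : 0 < (pvStrip rest 0 rf).count 'R' := by omega
                exact List.count_pos_iff.mp this
              have hb : 1 ≤ (pvStrip rest 0 rf).length := List.length_pos_of_mem hmemR
              have herase : ((pvStrip rest 0 rf).erase 'R').length
                  = (pvStrip rest 0 rf).length - 1 := List.length_erase_of_mem hmemR
              rw [e2, ecR, ecD]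
              rw [hs, pvGame_step 'D' (pvStrip rest 0 rf)
                    (List.mem_cons_of_mem _ hmemR) (List.mem_cons_self)]
              have hopp : pvOpp 'D' = 'R' := by decide
              rw [hopp, ← hstep]
              apply ih (rest ++ ['D']) 0 (rf + 1)
              · intro x hx
                rcases List.mem_append.mp hx with h | h
                · exact hq x (List.mem_cons_of_mem _ h)
                · simp at h; subst h; right; rfl
              · intro _
                have : 0 < (rest ++ ['D']).count 'D' := by simp
                omega
              · rw [hstep, hlen']
                set b := (pvStrip rest 0 rf).length with hbdef
                have hsa : (pvStrip ('D' :: rest) 0 rf).length = b + 1 := by rw [hs, List.length_cons, ← hbdef]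
                have hlen2 : ((pvStrip rest 0 rf).erase 'R' ++ ['D']).length = b := by
                  simp only [List.length_append, List.length_cons, List.length_nil, herase]
                  omega
                rw [hlen2]
                rw [hsa] at hμ
                simp only [List.length_cons] at hμ
                have hexp : (b + 1 + (rest.length + 1)) * (rest.length + 1 + 2)
                    = (b + (rest.length + 1)) * (rest.length + 1 + 2) + (rest.length + 3) := by
                  ring
                rw [hexp] at hμ
                linarith
            · -- no eligible 'R' remains: Dire phase
              rw [Nat.not_lt] at halive
              have hsR : 'R' ∉ pvStrip ('D' :: rest) 0 rf := by
                have := count_strip_R ('D' :: rest) 0 rf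
                have hz : (pvStrip ('D' :: rest) 0 rf).count 'R' = 0 := by
                  rw [this, hcntR]; omega
                exact List.count_eq_zero.mp hz
              rw [pvGame_dire _ hsR]
              rw [e2, ecR, ecD]
              apply pvLoopA_dire
              · intro x hx
                rcases List.mem_append.mp hx with h | h
                · exact hq x (List.mem_cons_of_mem _ h)
                · simp at h; subst h; right; rfl
              · simp; omega
              · simp
              · have hmin := length_strip_min ('D' :: rest) 0 rf
                rw [hcntD, hcntR] at hmin
                set a := (pvStrip ('D' :: rest) 0 rf).length with hadef
                have ha1 : 1 ≤ a := by rw [hadef, hs]; simp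
                have hminR : min rf (rest.count 'R') = rest.count 'R' := by omega
                rw [hminR] at hmin
                simp only [List.length_cons] at hmin hμ
                have hcR' : (rest ++ ['D']).count 'R' = rest.count 'R' := by simp
                have hidx : (rest ++ ['D']).idxOf 'R' ≤ (rest ++ ['D']).length :=
                  List.idxOf_le_length
                rw [hcR', hlen']
                set cR := rest.count 'R' with hcRdef
                set L := rest.length + 1 with hLdef
                have hle : cR + 2 ≤ a + L := by omega
                have hmul : (cR + 2) * (L + 2) ≤ (a + L) * (L + 2) :=
                  Nat.mul_le_mul_right _ hle
                have hexp : (cR + 2) * (L + 2) = cR * (L + 1) + cR + 2 * L + 4 := by ring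
                rw [hlen'] at hidx
                linarith
          · -- banned 'D' in front: removed
            have hdf1 : 1 ≤ df := by omega
            have hs : pvStrip ('D' :: rest) df rf = pvStrip rest (df - 1) rf := by
              cases df with
              | zero => omega
              | succ k => simp [pvStrip]
            rw [if_pos (by exact_mod_cast (show df ≠ 0 by omega))]
            have e1 : ((('D' :: rest).count 'D' : Int) - 1) = ((rest.count 'D' : Nat) : Int) := by
              rw [hcntD]; push_cast; ring
            have e2 : ((df : Int) - 1) = ((df - 1 : Nat) : Int) := by omega
            rw [e1, e2, hcntR, hs]
            apply ih rest (df - 1) rf (fun x hx => hq x (List.mem_cons_of_mem _ hx))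
            · intro hne
              have := hinv (by simp)
              rw [hcntR, hcntD] at this
              omega
            · rw [← hs]
              set a := (pvStrip ('D' :: rest) df rf).length with hadef
              simp only [List.length_cons] at hμ
              have hmul : (a + rest.length) * (rest.length + 2)
                  ≤ (a + rest.length + 1) * (rest.length + 3) :=
                Nat.mul_le_mul (by omega) (by omega)
              linarith

-- generic list facts used by the B-side proof
lemma pv_filter_eraseP_disj {α : Type} (l : List α) (p q : α → Bool)
    (h : ∀ x, p x = true → q x = false) : (l.eraseP p).filter q = l.filter q := by
  induction l with
  | nil => rfl
  | cons a t ih =>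
    by_cases hp : p a
    · rw [List.eraseP_cons_of_pos hp, List.filter_cons_of_neg (by simp [h a hp])]
    · rw [List.eraseP_cons_of_neg (by simp [hp])]
      by_cases hq : q a
      · rw [List.filter_cons_of_pos hq, List.filter_cons_of_pos hq, ih]
      · rw [List.filter_cons_of_neg (by simp [hq]), List.filter_cons_of_neg (by simp [hq]), ih]

lemma pv_filter_eraseP_self {α : Type} (l : List α) (p : α → Bool) :
    (l.eraseP p).filter p = (l.filter p).tail := by
  induction l with
  | nil => rfl
  | cons a t ih =>
    by_cases hp : p a
    · rw [List.eraseP_cons_of_pos hp, List.filter_cons_of_pos hp]; rfl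
    · rw [List.eraseP_cons_of_neg (by simp [hp]), List.filter_cons_of_neg (by simp [hp]),
        List.filter_cons_of_neg (by simp [hp]), ih]

-- main lemma for B: the two index queues compute pvGame of the labelled sequence
lemma pvLoopB_eq_game : ∀ (m : Nat) (l : List (Int × Char)) (n : Int),
    l.length ≤ m →
    (∀ p ∈ l, p.2 = 'R' ∨ p.2 = 'D') →
    l.Pairwise (fun p q => p.1 < q.1) →
    (∀ p ∈ l, ∀ q ∈ l, p.1 < q.1 + n) →
    pvLoopB ((l.filter (fun p => p.2 == 'R')).map Prod.fst)
            ((l.filter (fun p => p.2 == 'D')).map Prod.fst) n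
      = pvGame (l.map Prod.snd) := by
  intro m
  induction m with
  | zero =>
    intro l n hlen _ _ _
    have : l = [] := List.length_eq_zero_iff.mp (Nat.le_zero.mp hlen)
    subst this
    simp only [List.filter_nil, List.map_nil]
    rw [pvLoopB]
    exact (pvGame_dire [] (by simp)).symm
  | succ m ih =>
    intro l n hlen hall hpw hspread
    cases l with
    | nil =>
      simp only [List.filter_nil, List.map_nil]
      rw [pvLoopB]
      exact (pvGame_dire [] (by simp)).symm
    | cons hd tl =>
      obtain ⟨i, c⟩ := hd
      have hn : 0 < n := by
        have := hspread (i, c) List.mem_cons_self (i, c) List.mem_cons_self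
        omega
      have hpwtl : tl.Pairwise (fun p q => p.1 < q.1) := (List.pairwise_cons.mp hpw).2
      have hheadlt : ∀ p ∈ tl, i < p.1 := fun p hp => (List.pairwise_cons.mp hpw).1 p hp
      rcases hall (i, c) List.mem_cons_self with hc | hc
      · -- a Radiant senator is in front
        simp only at hc; subst hc
        have hfR : ((i, 'R') :: tl).filter (fun p => p.2 == 'R')
            = (i, 'R') :: tl.filter (fun p => p.2 == 'R') := by
          rw [List.filter_cons_of_pos (by simp)]
        have hfD : ((i, 'R') :: tl).filter (fun p => p.2 == 'D')
            = tl.filter (fun p => p.2 == 'D') := by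
          rw [List.filter_cons_of_neg (by simp)]
        cases hFD : tl.filter (fun p => p.2 == 'D') with
        | nil =>
          -- Dire has no senators at all
          have hnoD : 'D' ∉ ((i, 'R') :: tl).map Prod.snd := by
            intro hmem
            simp only [List.mem_map] at hmem
            obtain ⟨p, hp, hp2⟩ := hmem
            rcases List.mem_cons.mp hp with h | h
            · subst h; simp at hp2
            · have : p ∈ tl.filter (fun p => p.2 == 'D') :=
                List.mem_filter.mpr ⟨h, by simp [hp2]⟩
              rw [hFD] at this
              simp at this
          rw [hfR, hfD, hFD]
          simp only [List.map_cons, List.map_nil]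
          rw [pvLoopB]
          exact (pvGame_radiant _ (by simp) hnoD).symm
        | cons d0 ds0 =>
          have hd0mem : d0 ∈ tl ∧ (d0.2 == 'D') = true :=
            List.mem_filter.mp (hFD ▸ List.mem_cons_self)
          have hd0D : d0.2 = 'D' := by simpa using hd0mem.2
          have hid : i < d0.1 := hheadlt d0 hd0mem.1
          rw [hfR, hfD, hFD]
          simp only [List.map_cons]
          rw [pvLoopB]
          rw [if_pos hid]
          -- the new labelled sequence after this confrontation
          have hstep := ih (tl.eraseP (fun p => p.2 == 'D') ++ [(i + n, 'R')]) n
          have hlen' : (tl.eraseP (fun p => p.2 == 'D') ++ [(i + n, 'R')]).length ≤ m := by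
            have : (tl.eraseP (fun p => p.2 == 'D')).length = tl.length - 1 :=
              List.length_eraseP_of_mem hd0mem.1 hd0mem.2
            have h1 : 0 < tl.length := List.length_pos_of_mem hd0mem.1
            simp only [List.length_append, List.length_cons, List.length_nil, this]
            simp only [List.length_cons] at hlen
            omega
          have hall' : ∀ p ∈ tl.eraseP (fun p => p.2 == 'D') ++ [(i + n, 'R')],
              p.2 = 'R' ∨ p.2 = 'D' := by
            intro p hp
            rcases List.mem_append.mp hp with h | h
            · exact hall p (List.mem_cons_of_mem _ ((List.eraseP_sublist).subset h))
            · simp at h; subst h; left; rfl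
          have hpw' : (tl.eraseP (fun p => p.2 == 'D') ++ [(i + n, 'R')]).Pairwise
              (fun p q => p.1 < q.1) := by
            rw [List.pairwise_append]
            refine ⟨hpwtl.sublist List.eraseP_sublist, by simp, ?_⟩
            intro a ha b hb
            simp only [List.mem_singleton] at hb
            subst hb
            have hatl : a ∈ tl := (List.eraseP_sublist).subset ha
            have := hspread a (List.mem_cons_of_mem _ hatl) (i, 'R') List.mem_cons_self
            simpa using this
          have hspread' : ∀ p ∈ tl.eraseP (fun p => p.2 == 'D') ++ [(i + n, 'R')],
              ∀ q ∈ tl.eraseP (fun p => p.2 == 'D') ++ [(i + n, 'R')], p.1 < q.1 + n := by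
            intro p hp q hq
            rcases List.mem_append.mp hp with h1 | h1 <;> rcases List.mem_append.mp hq with h2 | h2
            · exact hspread p (List.mem_cons_of_mem _ ((List.eraseP_sublist).subset h1))
                q (List.mem_cons_of_mem _ ((List.eraseP_sublist).subset h2))
            · simp only [List.mem_singleton] at h2; subst h2
              have := hspread p (List.mem_cons_of_mem _ ((List.eraseP_sublist).subset h1))
                (i, 'R') List.mem_cons_self
              simp only at this ⊢
              omega
            · simp only [List.mem_singleton] at h1; subst h1
              have := hheadlt q ((List.eraseP_sublist).subset h2)
              simp only at this ⊢
              omega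
            · simp only [List.mem_singleton] at h1 h2; subst h1; subst h2
              simp only
              omega
          have hstep' := hstep hlen' hall' hpw' hspread'
          -- identify the two queues of the recursive call
          have hfR' : (tl.eraseP (fun p => p.2 == 'D') ++ [(i + n, 'R')]).filter
              (fun p => p.2 == 'R') = tl.filter (fun p => p.2 == 'R') ++ [(i + n, 'R')] := by
            rw [List.filter_append, pv_filter_eraseP_disj tl _ _ (by intro x hx; simp at hx ⊢; simp [hx])]
            simp
          have hfD' : (tl.eraseP (fun p => p.2 == 'D') ++ [(i + n, 'R')]).filter
              (fun p => p.2 == 'D') = ds0 := by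
            rw [List.filter_append, pv_filter_eraseP_self, hFD]
            simp
          rw [hfR', hfD'] at hstep'
          simp only [List.map_append, List.map_cons, List.map_nil] at hstep'
          rw [hstep']
          -- identify the two pvGame states
          have hsnd : (tl.eraseP (fun p => p.2 == 'D')).map Prod.snd
              = (tl.map Prod.snd).erase 'D' := by
            rw [List.erase_eq_eraseP' 'D' (tl.map Prod.snd), List.eraseP_map]
            rfl
          rw [hsnd]
          have hmemD : 'D' ∈ ((i, 'R') :: tl).map Prod.snd := by
            simp only [List.map_cons]
            refine List.mem_cons_of_mem _ ?_
            exact List.mem_map.mpr ⟨d0, hd0mem.1, hd0D⟩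
          have hgame := pvGame_step 'R' (tl.map Prod.snd)
            (by simp) (by simpa using hmemD)
          rw [hgame]
          have hopp : pvOpp 'R' = 'D' := by decide
          rw [hopp]
      · -- a Dire senator is in front
        simp only at hc; subst hc
        have hfD : ((i, 'D') :: tl).filter (fun p => p.2 == 'D')
            = (i, 'D') :: tl.filter (fun p => p.2 == 'D') := by
          rw [List.filter_cons_of_pos (by simp)]
        have hfR : ((i, 'D') :: tl).filter (fun p => p.2 == 'R')
            = tl.filter (fun p => p.2 == 'R') := by
          rw [List.filter_cons_of_neg (by simp)]
        cases hFR : tl.filter (fun p => p.2 == 'R') with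
        | nil =>
          have hnoR : 'R' ∉ ((i, 'D') :: tl).map Prod.snd := by
            intro hmem
            simp only [List.mem_map] at hmem
            obtain ⟨p, hp, hp2⟩ := hmem
            rcases List.mem_cons.mp hp with h | h
            · subst h; simp at hp2
            · have : p ∈ tl.filter (fun p => p.2 == 'R') :=
                List.mem_filter.mpr ⟨h, by simp [hp2]⟩
              rw [hFR] at this
              simp at this
          rw [hfR, hfD, hFR]
          simp only [List.map_cons, List.map_nil]
          rw [pvLoopB]
          exact (pvGame_dire _ hnoR).symm
        | cons r0 rs0 =>
          have hr0mem : r0 ∈ tl ∧ (r0.2 == 'R') = true :=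
            List.mem_filter.mp (hFR ▸ List.mem_cons_self)
          have hr0R : r0.2 = 'R' := by simpa using hr0mem.2
          have hir : i < r0.1 := hheadlt r0 hr0mem.1
          rw [hfR, hfD, hFR]
          simp only [List.map_cons]
          rw [pvLoopB]
          rw [if_neg (by omega)]
          have hstep := ih (tl.eraseP (fun p => p.2 == 'R') ++ [(i + n, 'D')]) n
          have hlen' : (tl.eraseP (fun p => p.2 == 'R') ++ [(i + n, 'D')]).length ≤ m := by
            have : (tl.eraseP (fun p => p.2 == 'R')).length = tl.length - 1 :=
              List.length_eraseP_of_mem hr0mem.1 hr0mem.2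
            have h1 : 0 < tl.length := List.length_pos_of_mem hr0mem.1
            simp only [List.length_append, List.length_cons, List.length_nil, this]
            simp only [List.length_cons] at hlen
            omega
          have hall' : ∀ p ∈ tl.eraseP (fun p => p.2 == 'R') ++ [(i + n, 'D')],
              p.2 = 'R' ∨ p.2 = 'D' := by
            intro p hp
            rcases List.mem_append.mp hp with h | h
            · exact hall p (List.mem_cons_of_mem _ ((List.eraseP_sublist).subset h))
            · simp at h; subst h; right; rfl
          have hpw' : (tl.eraseP (fun p => p.2 == 'R') ++ [(i + n, 'D')]).Pairwise
              (fun p q => p.1 < q.1) := by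
            rw [List.pairwise_append]
            refine ⟨hpwtl.sublist List.eraseP_sublist, by simp, ?_⟩
            intro a ha b hb
            simp only [List.mem_singleton] at hb
            subst hb
            have hatl : a ∈ tl := (List.eraseP_sublist).subset ha
            have := hspread a (List.mem_cons_of_mem _ hatl) (i, 'D') List.mem_cons_self
            simpa using this
          have hspread' : ∀ p ∈ tl.eraseP (fun p => p.2 == 'R') ++ [(i + n, 'D')],
              ∀ q ∈ tl.eraseP (fun p => p.2 == 'R') ++ [(i + n, 'D')], p.1 < q.1 + n := by
            intro p hp q hq
            rcases List.mem_append.mp hp with h1 | h1 <;> rcases List.mem_append.mp hq with h2 | h2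
            · exact hspread p (List.mem_cons_of_mem _ ((List.eraseP_sublist).subset h1))
                q (List.mem_cons_of_mem _ ((List.eraseP_sublist).subset h2))
            · simp only [List.mem_singleton] at h2; subst h2
              have := hspread p (List.mem_cons_of_mem _ ((List.eraseP_sublist).subset h1))
                (i, 'D') List.mem_cons_self
              simp only at this ⊢
              omega
            · simp only [List.mem_singleton] at h1; subst h1
              have := hheadlt q ((List.eraseP_sublist).subset h2)
              simp only at this ⊢
              omega
            · simp only [List.mem_singleton] at h1 h2; subst h1; subst h2
              simp only
              omega
          have hstep' := hstep hlen' hall' hpw' hspread'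
          have hfD' : (tl.eraseP (fun p => p.2 == 'R') ++ [(i + n, 'D')]).filter
              (fun p => p.2 == 'D') = tl.filter (fun p => p.2 == 'D') ++ [(i + n, 'D')] := by
            rw [List.filter_append, pv_filter_eraseP_disj tl _ _ (by intro x hx; simp at hx ⊢; simp [hx])]
            simp
          have hfR' : (tl.eraseP (fun p => p.2 == 'R') ++ [(i + n, 'D')]).filter
              (fun p => p.2 == 'R') = rs0 := by
            rw [List.filter_append, pv_filter_eraseP_self, hFR]
            simp
          rw [hfR', hfD'] at hstep'
          simp only [List.map_append, List.map_cons, List.map_nil] at hstep'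
          rw [hstep']
          have hsnd : (tl.eraseP (fun p => p.2 == 'R')).map Prod.snd
              = (tl.map Prod.snd).erase 'R' := by
            rw [List.erase_eq_eraseP' 'R' (tl.map Prod.snd), List.eraseP_map]
            rfl
          rw [hsnd]
          have hmemR : 'R' ∈ ((i, 'D') :: tl).map Prod.snd := by
            simp only [List.map_cons]
            refine List.mem_cons_of_mem _ ?_
            exact List.mem_map.mpr ⟨r0, hr0mem.1, hr0R⟩
          have hgame := pvGame_step 'D' (tl.map Prod.snd)
            (by simpa using hmemR) (by simp)
          rw [hgame]
          have hopp : pvOpp 'D' = 'R' := by decide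
          rw [hopp]

-- bridge: Python's str.count with a single-character needle is List.count
lemma pv_count_go (c : Char) : ∀ (l : List Char) (fuel acc : Nat), l.length ≤ fuel →
    PySem.Chars.count.go [c] fuel l acc = acc + l.count c := by
  intro l
  induction l with
  | nil => intro fuel acc _; cases fuel <;> simp [PySem.Chars.count.go]
  | cons h t ih =>
    intro fuel acc hf
    cases fuel with
    | zero => simp at hf
    | succ fuel =>
      by_cases hch : c = h
      · subst hch
        have hpre : [c].isPrefixOf (c :: t) = true := by simp [List.isPrefixOf]
        simp only [PySem.Chars.count.go, hpre, if_true]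
        rw [show ([c].length) = 1 from rfl]
        simp only [List.drop_succ_cons, List.drop_zero]
        rw [ih fuel (acc + 1) (by simp only [List.length_cons] at hf; omega)]
        simp [List.count_cons]
        omega
      · have hpre : [c].isPrefixOf (h :: t) = false := by
          simp [List.isPrefixOf]
          exact fun hh => hch hh
        simp only [PySem.Chars.count.go, hpre, Bool.false_eq_true, if_false]
        rw [ih fuel acc (by simp only [List.length_cons] at hf; omega)]
        have hne : (h == c) = false := by
          simp only [beq_eq_false_iff_ne, ne_eq]
          exact fun hh => hch hh.symm
        simp [List.count_cons, hne]

lemma pv_count_singleton (s : List Char) (c : Char) : PySem.Chars.count s [c] = s.count c := by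
  rw [PySem.Chars.count]
  simp only [List.isEmpty_cons, if_false]
  exact (pv_count_go c s s.length 0 le_rfl).trans (by omega)

lemma count_RD_length (q : List Char) (h : ∀ c ∈ q, c = 'R' ∨ c = 'D') :
    q.count 'R' + q.count 'D' = q.length := by
  induction q with
  | nil => simp
  | cons c t ih =>
    have ht := ih (fun x hx => h x (List.mem_cons_of_mem _ hx))
    rcases h c List.mem_cons_self with hc | hc <;> subst hc <;>
      simp [List.count_cons] <;> omega

lemma pvLoopA_rc_zero (fuel : Nat) (h : 0 < fuel) (dc df rf : Int) (q : List Char) :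
    pvLoopA fuel 0 dc df rf q = some "Dire" := by
  cases fuel with
  | zero => omega
  | succ fuel => simp [pvLoopA]

-- ===== VERDICT (by name: the statement is the Claim_ definition above) =====
theorem predictPartyVictory_i_spec : Claim_equal_predictPartyVictory_i := by
  intro senate _ hpre
  unfold Spec_predictPartyVictory_i predictPartyVictory_i predictPartyVictory_i_alt
  dsimp only
  have hcount : (PySem.Str.count senate "R" : Int)
      = ((senate.toList.count 'R' : Nat) : Int) := by
    rw [PySem.Str.count_eq, show "R".toList = ['R'] from rfl, pv_count_singleton]
  have hlen := PySem.Str.len_eq senate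
  have hms : (PySem.List.enumerate senate.toList).map Prod.snd = senate.toList := by
    simpa using PySem.List.map_snd_enumerate senate.toList 0
  rcases hpre with hallb | hnoR
  · -- the senate consists of 'R'/'D' only
    have hall : ∀ c ∈ senate.toList, c = 'R' ∨ c = 'D' := by
      intro c hc
      have := List.all_eq_true.mp hallb c hc
      simpa using this
    have hsum := count_RD_length senate.toList hall
    have hdc : PySem.Str.len senate - ((senate.toList.count 'R' : Nat) : Int)
        = ((senate.toList.count 'D' : Nat) : Int) := by
      rw [hlen]; push_cast; omega
    -- A computes pvGame
    have hA := pvLoopA_eq_game (4 * (senate.toList.length + 2) * (senate.toList.length + 2))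
        senate.toList 0 0 hall
        (fun hne => by
          have : 0 < senate.toList.length := List.length_pos_iff.mpr hne
          omega)
        (by
          rw [pvStrip_zero]
          nlinarith [Nat.zero_le senate.toList.length])
    rw [pvStrip_zero] at hA
    simp only [Nat.cast_zero] at hA
    -- B computes pvGame
    have hB := pvLoopB_eq_game (senate.toList.length) (PySem.List.enumerate senate.toList)
        (PySem.Str.len senate)
        (by rw [PySem.List.length_enumerate])
        (by
          intro p hp
          rw [PySem.List.mem_enumerate_iff] at hp
          obtain ⟨k, hk, rfl⟩ := hp
          exact hall _ (List.getElem_mem hk))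
        (PySem.List.pairwise_lt_enumerate senate.toList 0)
        (by
          intro p hp q hq
          rw [PySem.List.mem_enumerate_iff] at hp hq
          obtain ⟨k, hk, rfl⟩ := hp
          obtain ⟨k', hk', rfl⟩ := hq
          simp only [hlen]
          push_cast
          omega)
    rw [hms] at hB
    rw [hcount, hdc, hA, hB]
    rfl
  · -- no 'R' at all: both return "Dire" at once
    have hcR0 : senate.toList.count 'R' = 0 := List.count_eq_zero.mpr hnoR
    have hfR : (PySem.List.enumerate senate.toList).filter (fun p => p.2 == 'R') = [] := by
      rw [List.filter_eq_nil_iff]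
      intro p hp
      rw [PySem.List.mem_enumerate_iff] at hp
      obtain ⟨k, hk, rfl⟩ := hp
      intro h
      exact hnoR ((eq_of_beq h) ▸ List.getElem_mem hk)
    rw [hcount, hcR0, hfR]
    norm_num
    rw [pvLoopA_rc_zero _ (by positivity) _ _ _ _]
    rw [pvLoopB]
    rfl
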